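-- pv_equiv track=rewrite | github.com/linuxbox-cz/pgdist | src/dev/pg_parser.py | remove_default
-- ===== SOURCE A (Python) =====
-- def remove_default(args):
-- 	# remove from functions arguments
-- 	args = args[1:-1]
-- 	parsed = []
-- 	s = 0
-- 	i = 0
-- 	while i<len(args):
-- 		if args[i] == "'":
-- 			i += 1
-- 			while True:
-- 				if i+1<len(args) and args[i] == "'" and args[i+1] == "'":
-- 					i += 2
-- 					continue
-- 				if args[i] == "'":
-- 					i += 1
-- 					break
-- 				i += 1
-- 			continue
-- 		if args[i] == "(":
-- 			i = skip_exp(args, i+1)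
-- 			continue
-- 		if args[i] == ",":
-- 			parsed.append(args[s:i].split(' DEFAULT')[0])
-- 			i += 1
-- 			s = i
-- 			continue
-- 		if args[i] == " " and s == i:
-- 			s = i + 1
-- 		i += 1
-- 	if i > s:
-- 		parsed.append(args[s:i].split(' DEFAULT')[0])
--
-- 	return parsed
--
-- def skip_exp(args, i):
-- 	while i<len(args):
-- 		if args[i] == "'":
-- 			i += 1
-- 			while True:
-- 				if i+1<len(args) and args[i] == "'" and args[i+1] == "'":
-- 					i += 2
-- 					continue
-- 				if args[i] == "'":
-- 					i += 1
-- 					break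
-- 				i += 1
-- 			continue
-- 		if args[i] == "(":
-- 			i = skip_exp(args, i+1)
-- 			continue
-- 		if args[i] == ")":
-- 			return i + 1
-- 		i += 1
-- ===== SOURCE B (Python) =====
-- def remove_default(args):
-- 	# flat one-pass scan with a paren-depth counter and a quote flag
-- 	# (instead of A's recursive skip_exp helper)
-- 	args = args[1:-1]
-- 	parsed = []
-- 	depth = 0
-- 	in_quote = False
-- 	s = 0
-- 	i = 0
-- 	while i < len(args):
-- 		c = args[i]
-- 		if in_quote:
-- 			if c == "'":
-- 				in_quote = False
-- 		elif c == "'":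
-- 			in_quote = True
-- 		elif c == "(":
-- 			depth += 1
-- 		elif c == ")":
-- 			if depth > 0:
-- 				depth -= 1
-- 		elif depth == 0:
-- 			if c == ",":
-- 				parsed.append(args[s:i].split(' DEFAULT')[0])
-- 				s = i + 1
-- 			elif c == " " and s == i:
-- 				s = i + 1
-- 		i += 1
-- 	if i > s:
-- 		parsed.append(args[s:i].split(' DEFAULT')[0])
-- 	return parsed
-- ===== Notes on version B (the rewrite author's own statement) =====
-- stated objective: simpler
-- what changed: Replaces A's recursive skip_exp helper and its nested quote/paren re-scanning with a single flat pass over the stripped string that maintains an integer paren-depth counter and an in-quote flag, appending a segment at each top-level comma.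
import Mathlib
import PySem

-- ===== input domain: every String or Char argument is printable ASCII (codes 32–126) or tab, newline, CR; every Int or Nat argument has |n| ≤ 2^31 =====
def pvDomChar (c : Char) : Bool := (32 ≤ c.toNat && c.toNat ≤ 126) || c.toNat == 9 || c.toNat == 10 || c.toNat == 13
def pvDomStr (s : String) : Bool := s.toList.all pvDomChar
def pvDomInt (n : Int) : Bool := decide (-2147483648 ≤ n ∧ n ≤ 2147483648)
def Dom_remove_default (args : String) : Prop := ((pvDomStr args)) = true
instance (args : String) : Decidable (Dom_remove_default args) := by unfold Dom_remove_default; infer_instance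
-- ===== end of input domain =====

-- B replaces A's recursive skip_exp helper by a single flat scan with a paren-depth
-- counter and an in-quote flag (objective: simpler, one pass, no recursion).

-- ===== PORT A =====
-- args[s:i].split(' DEFAULT')[0], on the char list of the stripped string (shared by both ports,
-- since both Pythons compute this very expression for each finished segment)
def pvSeg (full : List Char) (s i : Nat) : String :=
  String.ofList ((PySem.Chars.splitOn ((full.drop s).take (i - s)) " DEFAULT".toList).headD [])

-- the inner  while True:  quote scanner (same code in remove_default and skip_exp);
-- `rest` is the suffix of the stripped string starting at index i; none = IndexError
def skipQuoteA : List Char → Nat → Option (List Char × Nat)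
  | [], _ => none                                     -- args[i] with i = len: IndexError
  | [c], i => if c = '\'' then some ([], i + 1) else none
  | c1 :: c2 :: rest, i =>
    if c1 = '\'' ∧ c2 = '\'' then skipQuoteA rest (i + 2)   -- escaped '' inside the literal
    else if c1 = '\'' then some (c2 :: rest, i + 1)         -- closing quote
    else skipQuoteA (c2 :: rest) (i + 1)

-- skip_exp; none = the implicit `return None` (TypeError in the caller) or IndexError;
-- fuel only makes the recursion structural, it is never exhausted when fuel > rest.length
def skipExpA : Nat → List Char → Nat → Option (List Char × Nat)
  | 0, _, _ => none
  | _ + 1, [], _ => none                              -- while ends: implicit return None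
  | fuel + 1, c :: rest, i =>
    if c = '\'' then
      match skipQuoteA rest (i + 1) with
      | none => none
      | some (rest', i') => skipExpA fuel rest' i'
    else if c = '(' then
      match skipExpA fuel rest (i + 1) with
      | none => none
      | some (rest', i') => skipExpA fuel rest' i'
    else if c = ')' then some (rest, i + 1)
    else skipExpA fuel rest (i + 1)

-- the main  while i < len(args)  loop of A
def mainA (full : List Char) : Nat → List Char → Nat → Nat → List String → Option (List String)
  | _, [], i, s, parsed => some (if s < i then parsed ++ [pvSeg full s i] else parsed)
  | 0, _ :: _, _, _, _ => none
  | fuel + 1, c :: rest, i, s, parsed =>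
    if c = '\'' then
      match skipQuoteA rest (i + 1) with
      | none => none
      | some (rest', i') => mainA full fuel rest' i' s parsed
    else if c = '(' then
      match skipExpA (fuel + 1) rest (i + 1) with
      | none => none
      | some (rest', i') => mainA full fuel rest' i' s parsed
    else if c = ',' then mainA full fuel rest (i + 1) (i + 1) (parsed ++ [pvSeg full s i])
    else if c = ' ' ∧ s = i then mainA full fuel rest (i + 1) (i + 1) parsed
    else mainA full fuel rest (i + 1) s parsed

def remove_default (args : String) : List String :=
  let full := PySem.Chars.slice args.toList (some 1) (some (-1))
  (mainA full (full.length + 1) full 0 0 []).getD []   -- getD: the none branch is A raising, excluded by Pre_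

-- ===== PORT B =====
-- the single  while i < len(args)  loop of B: depth counter + in_quote flag
def mainB (full : List Char) : List Char → Nat → Bool → Nat → Nat → List String → List String
  | [], i, _, _, s, parsed => if s < i then parsed ++ [pvSeg full s i] else parsed
  | c :: rest, i, inQ, depth, s, parsed =>
    if inQ then
      if c = '\'' then mainB full rest (i + 1) false depth s parsed
      else mainB full rest (i + 1) true depth s parsed
    else if c = '\'' then mainB full rest (i + 1) true depth s parsed
    else if c = '(' then mainB full rest (i + 1) false (depth + 1) s parsed
    else if c = ')' then mainB full rest (i + 1) false (if depth > 0 then depth - 1 else depth) s parsed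
    else if depth = 0 then
      if c = ',' then mainB full rest (i + 1) false 0 (i + 1) (parsed ++ [pvSeg full s i])
      else if c = ' ' ∧ s = i then mainB full rest (i + 1) false 0 (i + 1) parsed
      else mainB full rest (i + 1) false 0 s parsed
    else mainB full rest (i + 1) false depth s parsed

def remove_default_alt (args : String) : List String :=
  let full := PySem.Chars.slice args.toList (some 1) (some (-1))
  mainB full full 0 false 0 0 []

-- ===== PRECONDITION & SPEC =====
-- one step of the quote/paren balance scanner used only to STATE the precondition
def preStep : Bool × Nat → Char → Bool × Nat
  | (true, d), c => (decide (c ≠ '\''), d)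
  | (false, d), c =>
    if c = '\'' then (true, d)
    else if c = '(' then (false, d + 1)
    else if c = ')' then (false, d - 1)
    else (false, d)

-- Pre_ excludes exactly the inputs on which Python A raises: an unterminated quoted
-- literal (IndexError) or an unmatched opening parenthesis in the stripped body (skip_exp
-- returns None, then TypeError in the caller): i.e. scanning the stripped string, every
-- quoted literal is closed and every opened parenthesis is matched.
def Pre_remove_default (args : String) : Prop :=
  (PySem.Chars.slice args.toList (some 1) (some (-1))).foldl preStep (false, 0) = (false, 0)
instance (args : String) : Decidable (Pre_remove_default args) := by unfold Pre_remove_default; infer_instance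

def pvWitness_remove_default : String := "(a integer, b text DEFAULT 'x,)', c date)"

def Spec_remove_default (args : String) (out : List String) : Prop := out = remove_default_alt args
instance (args : String) (out : List String) : Decidable (Spec_remove_default args out) := by unfold Spec_remove_default; infer_instance

-- ===== CLAIM (what is proved, stated in full; the proofs are below) =====
def Claim_equal_remove_default : Prop := ∀ (args : String), Dom_remove_default args → Pre_remove_default args → Spec_remove_default args (remove_default args)

-- ===== LEMMAS AND PROOFS =====

lemma skipQuoteA_len (rest : List Char) (i : Nat) :
    ∀ rest' i', skipQuoteA rest i = some (rest', i') → rest'.length < rest.length := by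
  fun_induction skipQuoteA rest i
  all_goals intro rest' i' he
  all_goals simp_all
  all_goals omega
lemma skipQuoteA_scan (rest : List Char) (i : Nat) (d : Nat) :
    (∀ rest' i', skipQuoteA rest i = some (rest', i') →
      rest.foldl preStep (true, d) = rest'.foldl preStep (false, d)) ∧
    (skipQuoteA rest i = none → (rest.foldl preStep (true, d)).1 = true) := by
  fun_induction skipQuoteA rest i
  all_goals constructor
  all_goals first
    | (intro rest' i' he; simp_all [preStep])
    | (intro he; simp_all [preStep])
lemma skipExpA_len (fuel : Nat) (rest : List Char) (i : Nat) :
    ∀ rest' i', skipExpA fuel rest i = some (rest', i') → rest'.length < rest.length := by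
  fun_induction skipExpA fuel rest i
  all_goals intro rest' i' he
  all_goals simp_all
  all_goals try omega
  all_goals (have := skipQuoteA_len _ _ _ _ (by assumption); omega)

lemma skipExpA_scan (fuel : Nat) (rest : List Char) (i : Nat) :
    ∀ d, rest.length < fuel →
    ((∀ rest' i', skipExpA fuel rest i = some (rest', i') →
      rest.foldl preStep (false, d + 1) = rest'.foldl preStep (false, d)) ∧
    (skipExpA fuel rest i = none →
      (rest.foldl preStep (false, d + 1)).1 = true ∨ d + 1 ≤ (rest.foldl preStep (false, d + 1)).2)) := by
  fun_induction skipExpA fuel rest i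
  case case1 => intro d hf; exact absurd hf (Nat.not_lt_zero _)
  case case2 =>
    intro d hf
    refine ⟨by intro rest' i' he; simp [skipExpA] at he, by intro _; right; simp⟩
  case case3 =>
    rename_i fuel rest i hq
    intro d hf
    refine ⟨by intro _ _ h; simp at h, ?_⟩
    intro _
    left
    have := (skipQuoteA_scan rest (i + 1) (d + 1)).2 hq
    simpa [preStep] using this
  case case4 =>
    rename_i fuel rest i rest1 i1 hq ih
    intro d hf
    have hl := skipQuoteA_len _ _ _ _ hq
    have ht := (skipQuoteA_scan rest (i + 1) (d + 1)).1 _ _ hq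
    have ih' := ih d (by simp at hf; omega)
    have hstep : List.foldl preStep (false, d + 1) ('\'' :: rest) = List.foldl preStep (true, d + 1) rest := by
      simp [preStep]
    constructor
    · intro rest' i' he
      rw [hstep, ht]
      exact ih'.1 _ _ he
    · intro he
      rw [hstep, ht]
      exact ih'.2 he
  case case5 =>
    rename_i fuel rest i hq hne ih
    intro d hf
    refine ⟨by intro _ _ h; simp at h, ?_⟩
    intro _
    have hstep : List.foldl preStep (false, d + 1) ('(' :: rest) = List.foldl preStep (false, d + 1 + 1) rest := by
      simp [preStep]
    have := (ih (d + 1) (by simp at hf; omega)).2 hq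
    rw [hstep]
    rcases this with h | h
    · exact Or.inl h
    · exact Or.inr (by omega)
  case case6 =>
    rename_i fuel rest i rest1 i1 hinner hne ihinner ihouter
    intro d hf
    have hl := skipExpA_len _ _ _ _ _ hinner
    have ht := (ihinner (d + 1) (by simp at hf; omega)).1 _ _ hinner
    have ihout := ihouter d (by simp at hf; omega)
    have hstep : List.foldl preStep (false, d + 1) ('(' :: rest) = List.foldl preStep (false, d + 1 + 1) rest := by
      simp [preStep]
    constructor
    · intro rest' i' he
      rw [hstep, ht]
      exact ihout.1 _ _ he
    · intro he
      rw [hstep, ht]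
      exact ihout.2 he
  case case7 =>
    rename_i fuel rest i hne1 hne2
    intro d hf
    refine ⟨?_, by intro h; cases h⟩
    intro rest' i' he
    simp only [Option.some.injEq, Prod.mk.injEq] at he
    obtain ⟨h1, h2⟩ := he
    subst h1
    simp [preStep, hne1, hne2]
  case case8 =>
    rename_i fuel c rest i hne1 hne2 hne3 ih
    intro d hf
    have ih' := ih d (by simp at hf; omega)
    have hstep : List.foldl preStep (false, d + 1) (c :: rest) = List.foldl preStep (false, d + 1) rest := by
      simp [preStep, hne1, hne2, hne3]
    constructor
    · intro rest' i' he
      rw [hstep]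
      exact ih'.1 _ _ he
    · intro he
      rw [hstep]
      exact ih'.2 he

lemma skipQuoteA_sim (full : List Char) (rest : List Char) (i : Nat) :
    ∀ rest' i', skipQuoteA rest i = some (rest', i') →
      ∀ depth s parsed, mainB full rest i true depth s parsed = mainB full rest' i' false depth s parsed := by
  fun_induction skipQuoteA rest i
  all_goals intro rest' i' he depth s parsed
  all_goals try simp_all [mainB]
  all_goals (obtain ⟨h1, h2⟩ := he; subst h1; subst h2; simp_all [mainB])

lemma skipExpA_sim (full : List Char) (fuel : Nat) (rest : List Char) (i : Nat) :
    ∀ rest' i', skipExpA fuel rest i = some (rest', i') →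
      ∀ d s parsed, mainB full rest i false (d + 1) s parsed = mainB full rest' i' false d s parsed := by
  fun_induction skipExpA fuel rest i
  case case1 => intro rest' i' he; simp at he
  case case2 => intro rest' i' he; simp at he
  case case3 => intro rest' i' he; simp at he
  case case5 => intro rest' i' he; simp at he
  case case4 =>
    rename_i fuel rest i rest1 i1 hq ih
    intro rest' i' he d s parsed
    have hqs := skipQuoteA_sim full rest (i + 1) _ _ hq
    simp only [mainB, if_pos rfl]
    simp only [Bool.false_eq_true, if_false, if_pos rfl]
    rw [hqs (d + 1) s parsed]
    exact ih _ _ he d s parsed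
  case case6 =>
    rename_i fuel rest i rest1 i1 hinner hne ihinner ihouter
    intro rest' i' he d s parsed
    have h1 := ihinner _ _ hinner (d + 1) s parsed
    simp only [mainB, Bool.false_eq_true, if_false, if_neg hne, if_pos rfl]
    rw [h1]
    exact ihouter _ _ he d s parsed
  case case7 =>
    rename_i fuel rest i hne1 hne2
    intro rest' i' he d s parsed
    simp only [Option.some.injEq, Prod.mk.injEq] at he
    obtain ⟨h1, h2⟩ := he
    subst h1; subst h2
    simp [mainB, hne1, hne2]
  case case8 =>
    rename_i fuel c rest i hne1 hne2 hne3 ih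
    intro rest' i' he d s parsed
    simp only [mainB, Bool.false_eq_true, if_false, if_neg hne1, if_neg hne2, if_neg hne3,
      Nat.succ_ne_zero, if_false]
    rw [ih _ _ he d s parsed]

lemma mainA_eq_mainB (full : List Char) (fuel : Nat) :
    ∀ rest : List Char, rest.length < fuel → ∀ i s parsed,
      rest.foldl preStep (false, 0) = (false, 0) →
      mainA full fuel rest i s parsed = some (mainB full rest i false 0 s parsed) := by
  induction fuel with
  | zero => intro rest hf; exact absurd hf (Nat.not_lt_zero _)
  | succ f ih =>
    intro rest hf i s parsed hscan
    match rest with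
    | [] => simp [mainA, mainB]
    | c :: rest =>
      by_cases hq : c = '\''
      · subst hq
        have hscan' : rest.foldl preStep (true, 0) = (false, 0) := by
          simpa [preStep] using hscan
        cases hsq : skipQuoteA rest (i + 1) with
        | none =>
          have := (skipQuoteA_scan rest (i + 1) 0).2 hsq
          rw [hscan'] at this
          simp at this
        | some p =>
          obtain ⟨rest1, i1⟩ := p
          have hl := skipQuoteA_len _ _ _ _ hsq
          have ht := (skipQuoteA_scan rest (i + 1) 0).1 _ _ hsq
          have hscan1 : rest1.foldl preStep (false, 0) = (false, 0) := by rw [← ht]; exact hscan'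
          have hrec := ih rest1 (by simp at hf; omega) i1 s parsed hscan1
          simp only [mainA, if_pos rfl, hsq, hrec]
          simp only [mainB, Bool.false_eq_true, if_false, if_pos rfl]
          rw [skipQuoteA_sim full rest (i + 1) _ _ hsq 0 s parsed]
          simp
      · by_cases hp : c = '('
        · subst hp
          have hscan' : rest.foldl preStep (false, 0 + 1) = (false, 0) := by
            simpa [preStep] using hscan
          have hfr : rest.length < f + 1 := by simp at hf; omega
          cases hse : skipExpA (f + 1) rest (i + 1) with
          | none =>
            have := (skipExpA_scan (f + 1) rest (i + 1) 0 hfr).2 hse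
            rw [hscan'] at this
            simp at this
          | some p =>
            obtain ⟨rest1, i1⟩ := p
            have hl := skipExpA_len _ _ _ _ _ hse
            have ht := (skipExpA_scan (f + 1) rest (i + 1) 0 hfr).1 _ _ hse
            have hscan1 : rest1.foldl preStep (false, 0) = (false, 0) := by rw [← ht]; exact hscan'
            have hrec := ih rest1 (by simp at hf; omega) i1 s parsed hscan1
            simp only [mainA, hq, if_false, if_pos rfl, hse, hrec]
            simp only [mainB, Bool.false_eq_true, if_false, if_neg hq, if_pos rfl]
            rw [skipExpA_sim full (f + 1) rest (i + 1) _ _ hse 0 s parsed]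
            simp [hq]
        · have hstep : List.foldl preStep (false, 0) (c :: rest) = rest.foldl preStep (false, 0) := by
            by_cases hr : c = ')'
            · subst hr; simp [preStep, hq, hp]
            · by_cases hc : c = ','
              · subst hc; simp [preStep]
              · simp [preStep, hq, hp, hr, hc]
          have hscan' : rest.foldl preStep (false, 0) = (false, 0) := by rw [← hstep]; exact hscan
          by_cases hc : c = ','
          · subst hc
            have hrec := ih rest (by simp at hf; omega) (i + 1) (i + 1)
                (parsed ++ [pvSeg full s i]) hscan'
            simp [mainA, hq, hp, hrec, mainB]
          · by_cases hr : c = ')'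
            · subst hr
              have hrec := ih rest (by simp at hf; omega) (i + 1) s parsed hscan'
              simp [mainA, hq, hp, hrec, mainB]
            · by_cases hsp : c = ' ' ∧ s = i
              · have hrec := ih rest (by simp at hf; omega) (i + 1) (i + 1) parsed hscan'
                simp [mainA, hq, hp, hc, hsp, hrec, mainB, hr]
              · have hrec := ih rest (by simp at hf; omega) (i + 1) s parsed hscan'
                simp [mainA, hq, hp, hc, hsp, hrec, mainB, hr]

-- ===== VERDICT (by name: the statement is the Claim_ definition above) =====
theorem remove_default_spec : Claim_equal_remove_default := by
  intro args _ hpre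
  unfold Spec_remove_default remove_default remove_default_alt
  show (mainA (PySem.Chars.slice args.toList (some 1) (some (-1)))
      ((PySem.Chars.slice args.toList (some 1) (some (-1))).length + 1)
      (PySem.Chars.slice args.toList (some 1) (some (-1))) 0 0 []).getD [] =
    mainB (PySem.Chars.slice args.toList (some 1) (some (-1)))
      (PySem.Chars.slice args.toList (some 1) (some (-1))) 0 false 0 0 []
  rw [mainA_eq_mainB (PySem.Chars.slice args.toList (some 1) (some (-1)))
      ((PySem.Chars.slice args.toList (some 1) (some (-1))).length + 1)
      (PySem.Chars.slice args.toList (some 1) (some (-1))) (by omega) 0 0 [] hpre]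
  rfl
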